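-- pv_equiv track=rewrite | github.com/nlvegan/verenigingen | scripts/validation/refined_js_calls_analyzer.py | group_by_component
-- ===== SOURCE A (Python) =====
-- from collections import defaultdict
--
-- def group_by_component(results):
--     """Group results by component/module for better organization."""
--     groups = defaultdict(list)
--
--     for result in results:
--         method_path = result['method']
--
--         if 'e_boekhouden' in method_path:
--             groups['E-Boekhouden Integration'].append(result)
--         elif 'member_management' in method_path:
--             groups['Member Management'].append(result)
--         elif 'termination' in method_path:
--             groups['Termination Workflow'].append(result)
--         elif 'dd_batch' in method_path:
--             groups['Direct Debit Batching'].append(result)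
--         elif 'membership_application' in method_path:
--             groups['Membership Applications'].append(result)
--         elif 'chapter' in method_path:
--             groups['Chapter Management'].append(result)
--         elif 'volunteer' in method_path:
--             groups['Volunteer Management'].append(result)
--         else:
--             groups['General/Other'].append(result)
--
--     return groups
-- ===== SOURCE B (Python) =====
-- from collections import defaultdict
--
-- _CATEGORY_TABLE = [
--     ('e_boekhouden', 'E-Boekhouden Integration'),
--     ('member_management', 'Member Management'),
--     ('termination', 'Termination Workflow'),
--     ('dd_batch', 'Direct Debit Batching'),
--     ('membership_application', 'Membership Applications'),
--     ('chapter', 'Chapter Management'),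
--     ('volunteer', 'Volunteer Management'),
-- ]
--
-- def _classify(method_path):
--     return next((name for sub, name in _CATEGORY_TABLE if sub in method_path),
--                 'General/Other')
--
-- def group_by_component(results):
--     """Group results by component/module for better organization."""
--     pairs = [(_classify(r['method']), r) for r in results]
--     order = list(dict.fromkeys(lab for lab, _ in pairs))
--     groups = defaultdict(list)
--     for lab in order:
--         groups[lab] = [r for l, r in pairs if l == lab]
--     return groups
-- ===== Notes on version B (the rewrite author's own statement) =====
-- stated objective: alternative
-- what changed: Replaces A's single-pass incremental dict mutation (if/elif chain appending to groups one result at a time) by a staged group-by: classify every result once into (label, result) pairs, dedupe the labels in first-occurrence order, then build each group wholesale by filtering the pairs per label.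
import Mathlib
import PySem

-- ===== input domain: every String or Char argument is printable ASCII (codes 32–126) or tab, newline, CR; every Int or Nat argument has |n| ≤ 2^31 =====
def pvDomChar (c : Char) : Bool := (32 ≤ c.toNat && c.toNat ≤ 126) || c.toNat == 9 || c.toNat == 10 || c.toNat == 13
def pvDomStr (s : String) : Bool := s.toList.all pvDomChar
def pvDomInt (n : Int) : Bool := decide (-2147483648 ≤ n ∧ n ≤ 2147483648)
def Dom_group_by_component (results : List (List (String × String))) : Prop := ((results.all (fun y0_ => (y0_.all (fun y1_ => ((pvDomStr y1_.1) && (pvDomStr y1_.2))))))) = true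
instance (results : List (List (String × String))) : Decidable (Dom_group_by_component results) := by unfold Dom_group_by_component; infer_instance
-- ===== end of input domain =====

-- B replaces A's incremental dict mutation by a staged group-by (classify once, dedupe labels, build each group by filtering); same return value.

-- ===== PORT A =====
-- result['method'] : assoc-list lookup, first match (raises KeyError when absent -> Pre_)
def pvMethodOf (result : List (String × String)) : String :=
  ((result.find? (fun p => p.1 == "method")).map (·.2)).getD ""

-- one iteration of A's loop: the literal if/elif chain
def pvStepA (groups : PySem.Dict String (List (List (String × String))))
    (result : List (String × String)) : PySem.Dict String (List (List (String × String))) :=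
  let method_path := pvMethodOf result
  if PySem.Str.isIn "e_boekhouden" method_path then
    groups.modify "E-Boekhouden Integration" [] (fun l => l ++ [result])
  else if PySem.Str.isIn "member_management" method_path then
    groups.modify "Member Management" [] (fun l => l ++ [result])
  else if PySem.Str.isIn "termination" method_path then
    groups.modify "Termination Workflow" [] (fun l => l ++ [result])
  else if PySem.Str.isIn "dd_batch" method_path then
    groups.modify "Direct Debit Batching" [] (fun l => l ++ [result])
  else if PySem.Str.isIn "membership_application" method_path then
    groups.modify "Membership Applications" [] (fun l => l ++ [result])
  else if PySem.Str.isIn "chapter" method_path then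
    groups.modify "Chapter Management" [] (fun l => l ++ [result])
  else if PySem.Str.isIn "volunteer" method_path then
    groups.modify "Volunteer Management" [] (fun l => l ++ [result])
  else
    groups.modify "General/Other" [] (fun l => l ++ [result])

def group_by_component (results : List (List (String × String))) : List (String × List (List (String × String))) :=
  (results.foldl pvStepA PySem.Dict.empty).items

-- ===== PORT B =====
def pvCategoryTable : List (String × String) :=
  [("e_boekhouden", "E-Boekhouden Integration"),
   ("member_management", "Member Management"),
   ("termination", "Termination Workflow"),
   ("dd_batch", "Direct Debit Batching"),
   ("membership_application", "Membership Applications"),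
   ("chapter", "Chapter Management"),
   ("volunteer", "Volunteer Management")]

-- _classify: next(...) over the table with default 'General/Other'
def pvClassify (method_path : String) : String :=
  match pvCategoryTable.find? (fun p => PySem.Str.isIn p.1 method_path) with
  | some (_, name) => name
  | none => "General/Other"

-- staged group-by: pairs, then ordered label dedup, then one filtered group per label
def group_by_component_alt (results : List (List (String × String))) : List (String × List (List (String × String))) :=
  let pairs := results.map (fun r => (pvClassify (pvMethodOf r), r))
  let order := PySem.List.dedup (pairs.map (·.1))
  order.map (fun lab => (lab, (pairs.filter (fun p => p.1 == lab)).map (·.2)))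

-- ===== PRECONDITION & SPEC =====
-- Pre_ excludes results containing a dict without a 'method' key, on which A raises KeyError.
def Pre_group_by_component (results : List (List (String × String))) : Prop :=
  (results.all (fun result => result.any (fun p => p.1 == "method"))) = true
instance (results : List (List (String × String))) : Decidable (Pre_group_by_component results) := by unfold Pre_group_by_component; infer_instance
def pvWitness_group_by_component : (List (List (String × String))) := [[("method", "app.chapter.board")], [("method", "utils.misc")]]

def Spec_group_by_component (results : List (List (String × String))) (out : List (String × List (List (String × String)))) : Prop := out = group_by_component_alt results
instance (results : List (List (String × String))) (out : List (String × List (List (String × String)))) : Decidable (Spec_group_by_component results out) := by unfold Spec_group_by_component; infer_instance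

-- ===== CLAIM =====
def Claim_equal_group_by_component : Prop := ∀ (results : List (List (String × String))), Dom_group_by_component results → Pre_group_by_component results → Spec_group_by_component results (group_by_component results)

-- ===== LEMMAS AND PROOFS =====
-- A's if/elif step IS "modify at the classified label"
theorem pvStepA_eq (groups : PySem.Dict String (List (List (String × String))))
    (result : List (String × String)) :
    pvStepA groups result = groups.modify (pvClassify (pvMethodOf result)) [] (fun l => l ++ [result]) := by
  unfold pvStepA pvClassify pvCategoryTable
  simp only [List.find?]
  split_ifs <;> simp_all

-- ===== VERDICT =====
theorem group_by_component_spec : Claim_equal_group_by_component := by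
  intro results _ _
  unfold Spec_group_by_component group_by_component group_by_component_alt
  have hstep : results.foldl pvStepA PySem.Dict.empty
      = (results.map (fun r => (pvClassify (pvMethodOf r), r))).foldl
          (fun d p => d.modify p.1 [] (fun l => l ++ [p.2])) PySem.Dict.empty := by
    rw [List.foldl_map]
    apply PySem.List.foldl_congr_mem
    intro acc x _
    exact pvStepA_eq acc x
  set pairs := results.map (fun r => (pvClassify (pvMethodOf r), r)) with hp
  set d := pairs.foldl (fun d p => d.modify p.1 [] (fun l => l ++ [p.2])) PySem.Dict.empty with hd
  have hnd : d.keys.Nodup := by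
    rw [hd]
    exact PySem.Dict.nodup_keys_foldl_modify_key pairs Prod.fst []
      (fun d p => fun l => l ++ [p.2]) PySem.Dict.empty (by simp)
  have hkeys : d.keys = PySem.List.dedup (pairs.map (·.1)) := by
    rw [hd]
    have := PySem.Dict.keys_foldl_modify_key (l := pairs) (key := Prod.fst)
      (d0 := []) (f := fun d p => fun l => l ++ [p.2]) (d := PySem.Dict.empty)
    simpa [PySem.Set.update, PySem.List.dedup_eq_ofList, PySem.Set.ofList] using this
  rw [hstep]
  show d.items = (PySem.List.dedup (pairs.map (·.1))).map
    (fun lab => (lab, (pairs.filter (fun p => p.1 == lab)).map (·.2)))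
  rw [PySem.Dict.items_eq_map_keys d hnd [], hkeys]
  apply List.map_congr_left
  intro lab _
  have h := PySem.Dict.getD_foldl_modify_append (l := pairs) (d := PySem.Dict.empty)
    (c := lab)
  rw [hd]
  simp only [Prod.mk.injEq, true_and]
  rw [h]
  simp
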